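-- pv_equiv track=rewrite | github.com/qazedhq/qa-z | src/qa_z/self_improvement.py | compact_evidence_entry
-- ===== SOURCE A (Python) =====
-- from typing import Any
--
-- def compact_evidence_entry(evidence: list[Any]) -> dict[str, Any] | None:
--     """Pick the best evidence entry for one-line human summaries."""
--     entries = [entry for entry in evidence if isinstance(entry, dict)]
--     if not entries:
--         return None
--     return sorted(
--         enumerate(entries),
--         key=lambda pair: (compact_evidence_priority(pair[1]), pair[0]),
--     )[0][1]
--
-- def compact_evidence_priority(entry: dict[str, Any]) -> int:
--     """Return a lower priority value for more useful compact evidence."""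
--     summary = str(entry.get("summary") or "").lower()
--     if "alpha closure readiness snapshot" in summary:
--         return 0
--     return 1
-- ===== SOURCE B (Python) =====
-- def compact_evidence_entry(evidence):
--     """Pick the best evidence entry for one-line human summaries."""
--     entries = [entry for entry in evidence if isinstance(entry, dict)]
--     if not entries:
--         return None
--     for entry in entries:
--         summary = str(entry.get("summary") or "").lower()
--         if "alpha closure readiness snapshot" in summary:
--             return entry
--     return entries[0]
-- ===== Notes on version B (the rewrite author's own statement) =====
-- stated objective: simpler
-- what changed: Replaces the sort of (priority, index) pairs over enumerate(entries) with a single early-returning linear scan for the first entry whose summary contains the phrase, falling back to the first dict entry.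
import Mathlib
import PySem

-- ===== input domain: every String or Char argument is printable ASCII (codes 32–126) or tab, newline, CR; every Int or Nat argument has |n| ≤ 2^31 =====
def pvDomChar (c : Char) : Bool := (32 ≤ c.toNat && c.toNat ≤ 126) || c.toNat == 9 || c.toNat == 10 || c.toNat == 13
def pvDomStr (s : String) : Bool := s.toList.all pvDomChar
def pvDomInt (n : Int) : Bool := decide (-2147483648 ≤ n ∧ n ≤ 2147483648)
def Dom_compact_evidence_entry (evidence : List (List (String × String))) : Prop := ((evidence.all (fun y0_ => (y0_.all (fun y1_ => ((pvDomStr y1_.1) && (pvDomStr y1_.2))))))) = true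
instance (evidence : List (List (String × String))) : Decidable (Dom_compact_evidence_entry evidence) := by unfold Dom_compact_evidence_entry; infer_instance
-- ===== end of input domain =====

-- B replaces A's sort of (priority, index) pairs by an early-returning linear scan
-- for the first phrase-matching entry, with the first entry as fallback (simpler).

-- ===== PORT A =====
-- entry.get("summary") or "" : first-match association-list lookup, falsy "" stays ""
def pvSummaryA (entry : List (String × String)) : String :=
  ((entry.find? (fun kv => kv.1 == "summary")).map (·.2)).getD ""

def compact_evidence_priority (entry : List (String × String)) : Int :=
  let summary := PySem.Str.lower (pvSummaryA entry)
  if PySem.Str.isIn "alpha closure readiness snapshot" summary then 0 else 1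

def compact_evidence_entry (evidence : List (List (String × String))) : Option (List (String × String)) :=
  -- the isinstance(entry, dict) filter keeps every element under the type convention
  let entries := evidence
  if entries = [] then none
  else
    match PySem.List.sorted2 (PySem.List.enumerate entries)
            (fun pair => compact_evidence_priority pair.2) (fun pair => pair.1) with
    | [] => none        -- unreachable: sorted list of a nonempty list; Python's [0][1]
    | pair :: _ => some pair.2

-- ===== PORT B =====
def pvHitB (entry : List (String × String)) : Bool :=
  PySem.Str.isIn "alpha closure readiness snapshot"
    (PySem.Str.lower (((entry.find? (fun kv => kv.1 == "summary")).map (·.2)).getD ""))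

def compact_evidence_entry_alt (evidence : List (List (String × String))) : Option (List (String × String)) :=
  match evidence with
  | [] => none
  | first :: _ =>
    match evidence.find? pvHitB with
    | some entry => some entry
    | none => some first

-- ===== PRECONDITION & SPEC =====
def Spec_compact_evidence_entry (evidence : List (List (String × String))) (out : Option (List (String × String))) : Prop := out = compact_evidence_entry_alt evidence
instance (evidence : List (List (String × String))) (out : Option (List (String × String))) : Decidable (Spec_compact_evidence_entry evidence out) := by unfold Spec_compact_evidence_entry; infer_instance

-- ===== CLAIM (what is proved, stated in full; the proofs are below) =====
def Claim_equal_compact_evidence_entry : Prop := ∀ (evidence : List (List (String × String))), Dom_compact_evidence_entry evidence → Spec_compact_evidence_entry evidence (compact_evidence_entry evidence)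

-- ===== LEMMAS AND PROOFS =====

-- head of an insertion step: inserting x in front keeps / replaces the head
theorem pv_insertBy_cons (before : α → α → Bool) (x h : α) (t : List α) :
    PySem.List.insertBy before x (h :: t) =
      if before x h then x :: h :: t else h :: PySem.List.insertBy before x t := by
  simp [PySem.List.insertBy]

-- the head of insertion sort is the running strict-minimum of the input
theorem pv_head_foldl_insertBy (before : α → α → Bool) :
    ∀ (xs : List α) (h : α) (t : List α),
      ∃ t', xs.foldl (fun acc x => PySem.List.insertBy before x acc) (h :: t) =
        (xs.foldl (fun b x => if before x b then x else b) h) :: t' := by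
  intro xs
  induction xs with
  | nil => intro h t; exact ⟨t, rfl⟩
  | cons x xs ih =>
    intro h t
    simp only [List.foldl_cons, pv_insertBy_cons]
    by_cases hb : before x h
    · simpa [hb] using ih x (h :: t)
    · simpa [hb] using ih h (PySem.List.insertBy before x t)

-- head? form of the previous lemma
theorem pv_head?_foldl_insertBy (before : α → α → Bool) (xs : List α) (h : α) (t : List α) :
    (xs.foldl (fun acc x => PySem.List.insertBy before x acc) (h :: t)).head? =
      some (xs.foldl (fun b x => if before x b then x else b) h) := by
  obtain ⟨t', ht⟩ := pv_head_foldl_insertBy before xs h t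
  rw [ht]; rfl

-- sorted2's comparator, restricted to pairs whose first component only grows
def pvBefore (a b : Int × List (String × String)) : Bool :=
  decide (compact_evidence_priority a.2 < compact_evidence_priority b.2) ||
    (!decide (compact_evidence_priority b.2 < compact_evidence_priority a.2) &&
      decide (a.1 < b.1))

theorem pv_priority_eq (e : List (String × String)) :
    compact_evidence_priority e = if pvHitB e then 0 else 1 := by
  simp [compact_evidence_priority, pvHitB, pvSummaryA]

-- the running minimum over later-indexed pairs is: current entry if it hits,
-- else the first later hit, else the current entry
theorem pv_runmin (rest : List (List (String × String))) :
    ∀ (s j : Int) (e : List (String × String)), j < s →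
      (List.foldl (fun b x => if pvBefore x b then x else b) (j, e)
          (PySem.List.enumerate rest s)).2 =
        if pvHitB e then e else (rest.find? pvHitB).getD e := by
  induction rest with
  | nil => intro s j e _; simp [PySem.List.enumerate_nil]
  | cons x xs ih =>
    intro s j e hjs
    rw [PySem.List.enumerate_cons]
    simp only [List.foldl_cons]
    have hb : pvBefore (s, x) (j, e) =
        (decide (compact_evidence_priority x < compact_evidence_priority e)) := by
      simp [pvBefore, not_lt.mpr (le_of_lt hjs)]
    by_cases he : pvHitB e
    · have hf : pvBefore (s, x) (j, e) = false := by
        rw [hb]; simp [pv_priority_eq, he]; split <;> omega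
      rw [if_neg (by simp [hf])]
      rw [List.find?_cons]
      by_cases hx : pvHitB x <;>
        simp [he, ih (s+1) j e (by omega)]
    · by_cases hx : pvHitB x
      · have ht : pvBefore (s, x) (j, e) = true := by
          rw [hb]; simp [pv_priority_eq, he, hx]
        rw [if_pos ht]
        rw [ih (s+1) s x (by omega)]
        simp [hx, he]
      · have hf : pvBefore (s, x) (j, e) = false := by
          rw [hb]; simp [pv_priority_eq, he, hx]
        rw [if_neg (by simp [hf])]
        rw [ih (s+1) j e (by omega), List.find?_cons]
        simp [he, hx]

-- ===== VERDICT (by name: the statement is the Claim_ definition above) =====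
theorem compact_evidence_entry_spec : Claim_equal_compact_evidence_entry := by
  intro evidence _
  unfold Spec_compact_evidence_entry
  match evidence with
  | [] => rfl
  | e :: rest =>
    unfold compact_evidence_entry compact_evidence_entry_alt
    simp only [PySem.List.sorted2, Bool.false_eq_true, if_false]
    rw [PySem.List.enumerate_cons, if_neg (List.cons_ne_nil e rest)]
    simp only [List.foldl_cons, PySem.List.insertBy, zero_add]
    have hm : ∀ (l : List (Int × List (String × String))),
        (match l with
          | [] => (none : Option (List (String × String)))
          | pair :: _ => some pair.2) = l.head?.map (·.2) := by
      intro l; cases l <;> rfl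
    rw [hm]
    rw [pv_head?_foldl_insertBy
      (fun a b => decide (compact_evidence_priority a.2 < compact_evidence_priority b.2) ||
        (!decide (compact_evidence_priority b.2 < compact_evidence_priority a.2) &&
          decide (a.1 < b.1)))
      (PySem.List.enumerate rest 1) ((0 : Int), e) []]
    simp only [Option.map_some]
    show some ((List.foldl (fun b x => if pvBefore x b then x else b) ((0 : Int), e)
        (PySem.List.enumerate rest 1)).2) = _
    rw [pv_runmin rest 1 0 e (by omega)]
    rw [List.find?_cons]
    by_cases he : pvHitB e
    · simp [he]
    · rw [if_neg he]
      simp only [Bool.not_eq_true] at he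
      rw [he]
      cases rest.find? pvHitB <;> rfl
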